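-- pv_equiv track=rewrite | github.com/BuffJesus/Tuner | src/tuner/parsers/common.py | preprocess_ini_lines
-- ===== SOURCE A (Python) =====
-- def preprocess_ini_lines(
--     raw_lines: list[str],
--     active_settings: frozenset[str] = frozenset(),
-- ) -> list[str]:
--     """Evaluate ``#if``/``#else``/``#endif`` and ``#set``/``#unset`` directives.
--
--     Returns only the lines that belong to active conditional branches.
--     ``#define`` lines are kept so downstream macro-expansion still works.
--     ``#set``/``#unset`` are consumed (not emitted).
--
--     **Priority**: ``active_settings`` represents user/project-level choices and
--     takes precedence over file-level ``#set``/``#unset`` defaults.  The file is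
--     scanned in two passes: the first collects the file's own ``#set``/``#unset``
--     directives (at file scope only), the second evaluates conditionals using
--     ``effective = file_defaults | active_settings``.
--
--     Nesting is supported.  Unknown ``#``-directives are treated as comments and
--     dropped when inside an inactive branch.
--     """
--     # --- Phase 1: collect file-scope #set / #unset defaults ---
--     file_settings: set[str] = set()
--     nesting = 0  # depth inside #if blocks; #set/#unset outside these are "file scope"
--     for line in raw_lines:
--         stripped = line.strip()
--         if not stripped:
--             continue
--         parts = stripped.split(None, 1)
--         d = parts[0]
--         if d == "#if":
--             nesting += 1
--         elif d == "#endif":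
--             nesting = max(0, nesting - 1)
--         elif d in ("#set", "#unset") and nesting == 0:
--             symbol = parts[1].strip() if len(parts) > 1 else ""
--             if d == "#set":
--                 file_settings.add(symbol)
--             else:
--                 file_settings.discard(symbol)
--
--     # --- Effective settings: user wins over file defaults ---
--     settings: set[str] = (file_settings - set()) | set(active_settings)
--
--     # --- Phase 2: evaluate conditionals with fixed effective settings ---
--     result: list[str] = []
--     # Stack of (branch_active, has_seen_else)
--     # branch_active already folds in parent-branch activity.
--     stack: list[tuple[bool, bool]] = []
--
--     def _in_active_branch() -> bool:
--         return all(active for active, _ in stack)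
--
--     for line in raw_lines:
--         stripped = line.strip()
--         if not stripped:
--             if _in_active_branch():
--                 result.append(line)
--             continue
--
--         parts = stripped.split(None, 1)
--         directive = parts[0]
--
--         if directive == "#if":
--             symbol = parts[1].strip() if len(parts) > 1 else ""
--             branch_active = _in_active_branch() and symbol in settings
--             stack.append((branch_active, False))
--             continue
--
--         if directive == "#else":
--             if stack:
--                 was_active, seen_else = stack[-1]
--                 if not seen_else:
--                     parent_active = all(a for a, _ in stack[:-1])
--                     stack[-1] = (parent_active and not was_active, True)
--             continue
--
--         if directive == "#endif":
--             if stack: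
--                 stack.pop()
--             continue
--
--         if directive in ("#set", "#unset"):
--             # Consumed in phase 1; drop silently here.
--             continue
--
--         # All other # lines (comments, #define, unrecognised) — include
--         # only when inside an active branch.
--         if stripped.startswith("#") and not _in_active_branch():
--             continue
--
--         if _in_active_branch():
--             result.append(line)
--
--     return result
-- ===== SOURCE B (Python) =====
-- def preprocess_ini_lines(raw_lines, active_settings=frozenset()):
--     n = len(raw_lines)
--
--     def head(i):
--         parts = raw_lines[i].strip().split(None, 1)
--         return (parts[0] if parts else "",
--                 parts[1].strip() if len(parts) > 1 else "")
--
--     def skip(i):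
--         # phase 1: consume a nested #if block, return index just past its #endif
--         while i < n:
--             d, _ = head(i)
--             i += 1
--             if d == "#if":
--                 i = skip(i)
--             elif d == "#endif":
--                 return i
--         return i
--
--     # Phase 1: collect file-scope #set/#unset, hopping over #if blocks recursively
--     settings = set()
--     i = 0
--     while i < n:
--         d, sym = head(i)
--         i += 1
--         if d == "#if":
--             i = skip(i)
--         elif d == "#set":
--             settings.add(sym)
--         elif d == "#unset":
--             settings.discard(sym)
--     settings |= set(active_settings)
--
--     # Phase 2: recursive descent — one call frame per #if block, no stack scans
--     out = []
--
--     def block(i, parent_active, active):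
--         # evaluate one #if body; return index just past its #endif
--         seen_else = False
--         while i < n:
--             d, sym = head(i)
--             line = raw_lines[i]
--             i += 1
--             if d == "#if":
--                 i = block(i, active, active and sym in settings)
--             elif d == "#else":
--                 if not seen_else:
--                     active = parent_active and not active
--                     seen_else = True
--             elif d == "#endif":
--                 return i
--             elif d in ("#set", "#unset"):
--                 pass
--             elif active:
--                 out.append(line)
--         return i
--
--     i = 0
--     while i < n:
--         d, sym = head(i)
--         line = raw_lines[i]
--         i += 1
--         if d == "#if":
--             i = block(i, True, sym in settings)
--         elif d in ("#else", "#endif", "#set", "#unset"):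
--             pass
--         else:
--             out.append(line)
--     return out
-- ===== Notes on version B (the rewrite author's own statement) =====
-- stated objective: alternative
-- what changed: B replaces A's explicit stack of (branch_active, seen_else) frames with a per-line all()-scan by a recursive-descent evaluator: each #if block is consumed by one recursive call carrying (parent_active, active) locally, in both the #set-collection pass (recursive skip of nested blocks instead of a nesting counter) and the conditional-evaluation pass, making activity O(1) per line instead of O(depth).
import Mathlib
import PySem

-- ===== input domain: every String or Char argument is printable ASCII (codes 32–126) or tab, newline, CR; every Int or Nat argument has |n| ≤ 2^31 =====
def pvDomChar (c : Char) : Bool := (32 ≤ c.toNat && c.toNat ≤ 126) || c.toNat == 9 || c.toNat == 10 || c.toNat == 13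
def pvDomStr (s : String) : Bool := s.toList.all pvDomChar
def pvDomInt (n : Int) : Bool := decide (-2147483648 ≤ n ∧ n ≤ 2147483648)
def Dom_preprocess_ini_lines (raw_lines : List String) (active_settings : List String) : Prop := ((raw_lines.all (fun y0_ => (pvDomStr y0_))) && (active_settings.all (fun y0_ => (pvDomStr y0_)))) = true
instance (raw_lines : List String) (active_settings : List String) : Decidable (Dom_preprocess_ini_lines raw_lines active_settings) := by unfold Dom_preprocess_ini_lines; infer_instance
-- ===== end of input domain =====

-- B evaluates the directives by recursive descent (one recursive call per nested #if block, in
-- both phases) instead of A's explicit frame stack with a per-line all()-scan; return value only.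
set_option maxHeartbeats 1000000


-- ===== PORT A =====
-- `_in_active_branch()`: all(active for active, _ in stack).  The Python stack appends/pops
-- at the right end; the port keeps the TOP at the list head (stack[-1] = head, stack[:-1] = tail).
def pvAllFst (stack : List (Bool × Bool)) : Bool := stack.all (fun p => p.1)

-- one iteration of A's phase-1 loop (state: (file_settings, nesting))
def pvA1step (st : PySem.Set String × Int) (line : String) : PySem.Set String × Int :=
  let stripped := PySem.Str.strip line
  if stripped == "" then st
  else
    let parts := PySem.Str.split₀Max stripped 1
    -- parts[0]: parts is nonempty here (stripped is nonempty and fully stripped), so headD is exact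
    let d := parts.headD ""
    if d == "#if" then (st.1, st.2 + 1)
    else if d == "#endif" then (st.1, max 0 (st.2 - 1))
    else if (d == "#set" || d == "#unset") && st.2 == 0 then
      let symbol := match parts with | _ :: s :: _ => PySem.Str.strip s | _ => ""
      if d == "#set" then (PySem.Set.add st.1 symbol, st.2) else (PySem.Set.discard st.1 symbol, st.2)
    else st

-- one iteration of A's phase-2 loop (state: (result, stack))
def pvA2step (settings : PySem.Set String) (st : List String × List (Bool × Bool)) (line : String) :
    List String × List (Bool × Bool) :=
  let stripped := PySem.Str.strip line
  if stripped == "" then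
    (if pvAllFst st.2 then st.1 ++ [line] else st.1, st.2)
  else
    let parts := PySem.Str.split₀Max stripped 1
    -- parts[0]: parts is nonempty here (stripped is nonempty and fully stripped), so headD is exact
    let d := parts.headD ""
    if d == "#if" then
      let symbol := match parts with | _ :: s :: _ => PySem.Str.strip s | _ => ""
      (st.1, (pvAllFst st.2 && PySem.Set.contains settings symbol, false) :: st.2)
    else if d == "#else" then
      match st.2 with
      | [] => st
      | (was_active, seen_else) :: rest =>
        if !seen_else then (st.1, (pvAllFst rest && !was_active, true) :: rest) else st
    else if d == "#endif" then
      match st.2 with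
      | [] => st
      | _ :: rest => (st.1, rest)
    else if d == "#set" || d == "#unset" then st
    else if PySem.Str.startswith stripped "#" && !pvAllFst st.2 then st
    else if pvAllFst st.2 then (st.1 ++ [line], st.2) else st

def preprocess_ini_lines (raw_lines : List String) (active_settings : List String) : List String :=
  let p1 := raw_lines.foldl pvA1step (PySem.Set.empty, 0)
  -- settings = (file_settings - set()) | set(active_settings)
  let settings := PySem.Set.union (PySem.Set.diff p1.1 PySem.Set.empty) (PySem.Set.ofList active_settings)
  (raw_lines.foldl (pvA2step settings) ([], [])).1

-- ===== PORT B =====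
-- head(i): (first token of the stripped line or "", stripped remainder or "")
def pvHead (line : String) : String × String :=
  match PySem.Str.split₀Max (PySem.Str.strip line) 1 with
  | [] => ("", "")
  | [d] => (d, "")
  | d :: s :: _ => (d, PySem.Str.strip s)

-- skip(i): phase 1, consume one nested #if block up to its #endif.
-- The subtype bound (the remainder is no longer than the input) is only the termination measure.
def pvSkip : (lines : List String) → { r : List String // r.length ≤ lines.length }
  | [] => ⟨[], Nat.le_refl _⟩
  | line :: rest =>
    let d := (pvHead line).1
    if d == "#if" then
      let r1 := pvSkip rest
      let r2 := pvSkip r1.val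
      ⟨r2.val, Nat.le_succ_of_le (Nat.le_trans r2.property r1.property)⟩
    else if d == "#endif" then ⟨rest, Nat.le_succ_of_le (Nat.le_refl _)⟩
    else
      let r := pvSkip rest
      ⟨r.val, Nat.le_succ_of_le r.property⟩
termination_by lines => lines.length
decreasing_by
  · simp
  · exact Nat.lt_succ_of_le r1.property
  · simp

-- phase-1 main loop: collect file-scope #set/#unset, hopping over #if blocks via pvSkip
def pvCollect : (lines : List String) → PySem.Set String → PySem.Set String
  | [], fs => fs
  | line :: rest, fs =>
    let h := pvHead line
    if h.1 == "#if" then pvCollect (pvSkip rest).val fs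
    else if h.1 == "#set" then pvCollect rest (PySem.Set.add fs h.2)
    else if h.1 == "#unset" then pvCollect rest (PySem.Set.discard fs h.2)
    else pvCollect rest fs
termination_by lines => lines.length
decreasing_by
  · exact Nat.lt_succ_of_le (pvSkip rest).property
  · simp
  · simp
  · simp

-- block(i, parent_active, active): evaluate one #if body; returns (out so far, lines past #endif)
def pvBlock (settings : PySem.Set String) :
    (lines : List String) → Bool → Bool → Bool → List String →
    { r : List String × List String // r.2.length ≤ lines.length }
  | [], _, _, _, acc => ⟨(acc, []), Nat.le_refl _⟩
  | line :: rest, pa, act, seen, acc =>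
    let h := pvHead line
    if h.1 == "#if" then
      let r1 := pvBlock settings rest act (act && PySem.Set.contains settings h.2) false acc
      let r2 := pvBlock settings r1.val.2 pa act seen r1.val.1
      ⟨r2.val, Nat.le_succ_of_le (Nat.le_trans r2.property r1.property)⟩
    else if h.1 == "#else" then
      (if !seen then
        let r := pvBlock settings rest pa (pa && !act) true acc
        ⟨r.val, Nat.le_succ_of_le r.property⟩
      else
        let r := pvBlock settings rest pa act seen acc
        ⟨r.val, Nat.le_succ_of_le r.property⟩)
    else if h.1 == "#endif" then ⟨(acc, rest), Nat.le_succ_of_le (Nat.le_refl _)⟩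
    else if h.1 == "#set" || h.1 == "#unset" then
      let r := pvBlock settings rest pa act seen acc
      ⟨r.val, Nat.le_succ_of_le r.property⟩
    else
      let r := pvBlock settings rest pa act seen (if act then acc ++ [line] else acc)
      ⟨r.val, Nat.le_succ_of_le r.property⟩
termination_by lines => lines.length
decreasing_by
  · simp
  · exact Nat.lt_succ_of_le r1.property
  · simp
  · simp
  · simp
  · simp

-- phase-2 top-level loop (always active; stray #else/#endif ignored)
def pvTop (settings : PySem.Set String) : (lines : List String) → List String → List String
  | [], acc => acc
  | line :: rest, acc =>
    let h := pvHead line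
    if h.1 == "#if" then
      let r := pvBlock settings rest true (PySem.Set.contains settings h.2) false acc
      pvTop settings r.val.2 r.val.1
    else if h.1 == "#else" || h.1 == "#endif" || h.1 == "#set" || h.1 == "#unset" then
      pvTop settings rest acc
    else pvTop settings rest (acc ++ [line])
termination_by lines => lines.length
decreasing_by
  · exact Nat.lt_succ_of_le r.property
  · simp
  · simp

def preprocess_ini_lines_alt (raw_lines : List String) (active_settings : List String) : List String :=
  let settings := PySem.Set.union (pvCollect raw_lines PySem.Set.empty) (PySem.Set.ofList active_settings)
  pvTop settings raw_lines []


-- ===== PRECONDITION & SPEC =====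
def Spec_preprocess_ini_lines (raw_lines : List String) (active_settings : List String) (out : List String) : Prop := out = preprocess_ini_lines_alt raw_lines active_settings
instance (raw_lines : List String) (active_settings : List String) (out : List String) : Decidable (Spec_preprocess_ini_lines raw_lines active_settings out) := by unfold Spec_preprocess_ini_lines; infer_instance

-- ===== CLAIM (what is proved, stated in full; the proofs are below) =====
def Claim_equal_preprocess_ini_lines : Prop := ∀ (raw_lines : List String) (active_settings : List String), Dom_preprocess_ini_lines raw_lines active_settings → Spec_preprocess_ini_lines raw_lines active_settings (preprocess_ini_lines raw_lines active_settings)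

-- ===== LEMMAS AND PROOFS =====
lemma go_ne_nil : ∀ (fuel m : Nat) (l : List Char) (acc : List (List Char)), acc ≠ [] →
    PySem.Chars.split₀Max.go fuel m l acc ≠ [] := by
  intro fuel
  induction fuel with
  | zero => intro m l acc h; simpa [PySem.Chars.split₀Max.go] using h
  | succ f ih =>
    intro m l acc h
    rw [PySem.Chars.split₀Max.go]
    rcases hd : List.dropWhile PySem.Chars.isspace l with _ | ⟨c, t⟩
    · simpa using h
    · by_cases hm : m = 0
      · simp [hm]
      · simpa [hm] using ih (m-1) _ _ (by simp)

lemma strip_head_not_space (cs : List Char) (c : Char) (t : List Char)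
    (h : PySem.Chars.strip cs = c :: t) : PySem.Chars.isspace c = false := by
  unfold PySem.Chars.strip PySem.Chars.rstrip at h
  rcases hl : PySem.Chars.lstrip cs with _ | ⟨c', t'⟩
  · rw [hl] at h; simp at h
  · have hc' : PySem.Chars.isspace c' = false := by
      have := List.head?_dropWhile_not PySem.Chars.isspace cs
      unfold PySem.Chars.lstrip at hl
      rw [hl] at this; simpa using this
    rw [hl] at h
    -- h : (List.dropWhile isspace (c'::t').reverse).reverse = c :: t ; head preserved
    have : (List.dropWhile PySem.Chars.isspace (c' :: t').reverse).reverse <+: c' :: t' := by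
      have hs : List.dropWhile PySem.Chars.isspace (c' :: t').reverse <:+ (c' :: t').reverse :=
        List.dropWhile_suffix _
      have := List.reverse_prefix.mpr hs
      simpa using this
    rw [h] at this
    obtain ⟨r, hr⟩ := this
    have hcc : c = c' := by
      have := congrArg (fun l => l.head?) hr
      simpa using this
    rw [hcc]; exact hc'

lemma split_strip_ne_nil (s : String) (h : (PySem.Str.strip s).toList ≠ []) :
    PySem.Str.split₀Max (PySem.Str.strip s) 1 ≠ [] := by
  rcases hl : (PySem.Str.strip s).toList with _ | ⟨c, t⟩
  · exact absurd hl h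
  · have hcs : PySem.Chars.strip s.toList = c :: t := by
      have : (PySem.Str.strip s).toList = PySem.Chars.strip s.toList := by
        simp [PySem.Str.strip]
      rw [← this, hl]
    have hc := strip_head_not_space s.toList c t hcs
    unfold PySem.Str.split₀Max
    rw [hl]
    unfold PySem.Chars.split₀Max
    norm_num
    rw [PySem.Chars.split₀Max.go]
    simp only [List.dropWhile_cons, hc]
    have hne : (c :: t) ≠ ([] : List Char) := by simp
    intro hcon
    simp only [if_neg (by decide : ¬ (false = true))] at hcon
    rcases hmm : (c :: t) with _ | ⟨c2, t2⟩
    · simp at hmm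
    · simp only [hmm] at hcon
      rw [if_neg (by decide : ¬ (1 = 0))] at hcon
      exact go_ne_nil _ _ _ _ (by simp) hcon

lemma str_toList_ne_nil (s : String) (h : s ≠ "") : s.toList ≠ [] := by
  intro hc
  exact h (String.toList_eq_nil_iff.mp hc)

lemma pvA1step_eq (st : PySem.Set String × Int) (line : String) :
    pvA1step st line =
      (let h := pvHead line
       if h.1 == "#if" then (st.1, st.2 + 1)
       else if h.1 == "#endif" then (st.1, max 0 (st.2 - 1))
       else if (h.1 == "#set" || h.1 == "#unset") && st.2 == 0 then
         (if h.1 == "#set" then (PySem.Set.add st.1 h.2, st.2)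
          else (PySem.Set.discard st.1 h.2, st.2))
       else st) := by
  unfold pvA1step pvHead
  by_cases hs : PySem.Str.strip line == ""
  · rw [show PySem.Str.strip line = "" from by simpa using hs,
        show PySem.Str.split₀Max "" 1 = [] from rfl]
    simp
  · have hnl : (PySem.Str.strip line).toList ≠ [] :=
      str_toList_ne_nil _ (by simpa using hs)
    rcases hp : PySem.Str.split₀Max (PySem.Str.strip line) 1 with _ | ⟨d, rest⟩
    · exact absurd hp (split_strip_ne_nil line hnl)
    · rcases rest with _ | ⟨s2, r2⟩ <;> simp [hs, hp]

lemma pvA2step_eq (settings : PySem.Set String) (st : List String × List (Bool × Bool)) (line : String) :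
    pvA2step settings st line =
      (let h := pvHead line
       if h.1 == "#if" then
         (st.1, (pvAllFst st.2 && PySem.Set.contains settings h.2, false) :: st.2)
       else if h.1 == "#else" then
         match st.2 with
         | [] => st
         | (w, se) :: r => if !se then (st.1, (pvAllFst r && !w, true) :: r) else st
       else if h.1 == "#endif" then
         match st.2 with
         | [] => st
         | _ :: r => (st.1, r)
       else if h.1 == "#set" || h.1 == "#unset" then st
       else if pvAllFst st.2 then (st.1 ++ [line], st.2) else st) := by
  unfold pvA2step pvHead
  by_cases hs : PySem.Str.strip line == ""
  · rw [show PySem.Str.strip line = "" from by simpa using hs,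
        show PySem.Str.split₀Max "" 1 = [] from rfl]
    cases h2 : pvAllFst st.2 <;> simp
  · have hnl : (PySem.Str.strip line).toList ≠ [] :=
      str_toList_ne_nil _ (by simpa using hs)
    rcases hp : PySem.Str.split₀Max (PySem.Str.strip line) 1 with _ | ⟨d, rest⟩
    · exact absurd hp (split_strip_ne_nil line hnl)
    · rcases rest with _ | ⟨s2, r2⟩ <;>
      · simp only [hs, hp, Bool.false_eq_true, if_false, List.headD_cons]
        by_cases h1 : d == "#if"
        · simp [h1]
        · by_cases h2 : d == "#else"
          · simp [h1, h2]
          · by_cases h3 : d == "#endif"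
            · simp [h1, h2, h3]
            · by_cases h4 : (d == "#set" || d == "#unset") = true
              · simp [h1, h2, h3, h4]
              · cases ha : pvAllFst st.2 <;>
                  cases hst : PySem.Str.startswith (PySem.Str.strip line) "#" <;>
                    simp [h1, h2, h3, h4]

lemma skip_sim : ∀ (N : Nat) (lines : List String), lines.length ≤ N →
    ∀ (fs : PySem.Set String) (n : Int), 1 ≤ n →
    (lines.foldl pvA1step (fs, n)).1 = ((pvSkip lines).val.foldl pvA1step (fs, n - 1)).1 := by
  intro N
  induction N with
  | zero =>
    intro lines hl fs n hn
    have h0 : lines = [] := List.eq_nil_of_length_eq_zero (Nat.le_zero.mp hl)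
    subst h0; simp [pvSkip]
  | succ N ih =>
    intro lines hl fs n hn
    rcases lines with _ | ⟨line, rest⟩
    · simp [pvSkip]
    · have hr : rest.length ≤ N := by simpa using hl
      rw [List.foldl_cons, pvA1step_eq]
      rw [pvSkip]
      by_cases h1 : (pvHead line).1 == "#if"
      · simp only [h1, if_pos]
        have e1 := ih rest hr fs (n + 1) (by omega)
        have e2 := ih (pvSkip rest).val (Nat.le_trans (pvSkip rest).property hr) fs n hn
        simp only [show n + 1 - 1 = n from by ring] at e1
        rw [e1, e2]
      · by_cases h2 : (pvHead line).1 == "#endif"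
        · simp only [h1, h2, Bool.false_eq_true, if_false, if_pos]
          rw [show max 0 (n - 1) = n - 1 from max_eq_right (by omega)]
        · have hz : (n == 0) = false := by simp; omega
          by_cases h3 : ((pvHead line).1 == "#set" || (pvHead line).1 == "#unset") = true
          · simp only [h1, h2, h3, hz, Bool.and_false, Bool.false_eq_true, if_false]
            exact ih rest hr fs n hn
          · simp only [h1, h2, h3, Bool.false_eq_true, Bool.false_and, if_false]
            exact ih rest hr fs n hn

lemma collect_sim : ∀ (N : Nat) (lines : List String), lines.length ≤ N →
    ∀ (fs : PySem.Set String),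
    (lines.foldl pvA1step (fs, 0)).1 = pvCollect lines fs := by
  intro N
  induction N with
  | zero =>
    intro lines hl fs
    have h0 : lines = [] := List.eq_nil_of_length_eq_zero (Nat.le_zero.mp hl)
    subst h0; simp [pvCollect]
  | succ N ih =>
    intro lines hl fs
    rcases lines with _ | ⟨line, rest⟩
    · simp [pvCollect]
    · have hr : rest.length ≤ N := by simpa using hl
      rw [List.foldl_cons, pvA1step_eq]
      rw [pvCollect]
      by_cases h1 : (pvHead line).1 == "#if"
      · simp only [h1, if_pos]
        have e1 := skip_sim N rest hr fs 1 (by omega)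
        simp only [show (1 : Int) - 1 = 0 from by ring] at e1
        rw [show (0 : Int) + 1 = 1 from by ring, e1]
        exact ih (pvSkip rest).val (Nat.le_trans (pvSkip rest).property hr) fs
      · by_cases h2 : (pvHead line).1 == "#endif"
        · have hset : ((pvHead line).1 == "#set") = false := by
            rw [show (pvHead line).1 = "#endif" from by simpa using h2]; decide
          have huns : ((pvHead line).1 == "#unset") = false := by
            rw [show (pvHead line).1 = "#endif" from by simpa using h2]; decide
          simp only [h1, h2, hset, huns, Bool.false_eq_true, if_false, if_pos]
          rw [show max 0 ((0 : Int) - 1) = 0 from by decide]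
          exact ih rest hr fs
        · by_cases h3 : (pvHead line).1 == "#set"
          · simp only [h1, h2, h3, Bool.false_eq_true, if_false, Bool.true_or,
              Bool.and_true, if_pos, show ((0 : Int) == 0) = true from by decide]
            exact ih rest hr (PySem.Set.add fs (pvHead line).2)
          · by_cases h4 : (pvHead line).1 == "#unset"
            · simp only [h1, h2, h3, h4, Bool.false_eq_true, if_false,
                Bool.or_true, Bool.and_true, if_pos, show ((0 : Int) == 0) = true from by decide]
              exact ih rest hr (PySem.Set.discard fs (pvHead line).2)
            · simp only [h1, h2, h3, h4, Bool.false_eq_true, if_false, Bool.or_self,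
                Bool.false_and]
              exact ih rest hr fs

lemma pvAllFst_cons (p : Bool × Bool) (S : List (Bool × Bool)) :
    pvAllFst (p :: S) = (p.1 && pvAllFst S) := by simp [pvAllFst]

lemma bool_aux1 (x c : Bool) : ((x && c) && x) = (x && c) := by cases x <;> cases c <;> rfl
lemma bool_aux2 (p a : Bool) : (p && !(a && p)) = (p && !a) := by cases p <;> cases a <;> rfl
lemma bool_aux3 (p a : Bool) : ((p && !a) && p) = (p && !a) := by cases p <;> cases a <;> rfl

lemma block_sim (settings : PySem.Set String) : ∀ (N : Nat) (lines : List String), lines.length ≤ N →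
    ∀ (acc : List String) (a s : Bool) (S : List (Bool × Bool)),
    (lines.foldl (pvA2step settings) (acc, (a, s) :: S)).1 =
      ((pvBlock settings lines (pvAllFst S) (a && pvAllFst S) s acc).val.2.foldl (pvA2step settings)
        ((pvBlock settings lines (pvAllFst S) (a && pvAllFst S) s acc).val.1, S)).1 := by
  intro N
  induction N with
  | zero =>
    intro lines hl acc a s S
    have h0 : lines = [] := List.eq_nil_of_length_eq_zero (Nat.le_zero.mp hl)
    subst h0; simp [pvBlock]
  | succ N ih =>
    intro lines hl acc a s S
    rcases lines with _ | ⟨line, rest⟩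
    · simp [pvBlock]
    · have hr : rest.length ≤ N := by simpa using hl
      rw [List.foldl_cons, pvA2step_eq]
      rw [pvBlock]
      by_cases h1 : (pvHead line).1 == "#if"
      · simp only [h1, if_pos, pvAllFst_cons]
        have e1 := ih rest hr acc
          ((a && pvAllFst S) && PySem.Set.contains settings (pvHead line).2) false ((a, s) :: S)
        simp only [pvAllFst_cons, bool_aux1] at e1
        rw [e1]
        set r1 := pvBlock settings rest (a && pvAllFst S)
          ((a && pvAllFst S) && PySem.Set.contains settings (pvHead line).2) false acc with hr1
        exact ih r1.val.2 (Nat.le_trans r1.property hr) r1.val.1 a s S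
      · by_cases h2 : (pvHead line).1 == "#else"
        · simp only [h1, h2, Bool.false_eq_true, if_false, if_pos]
          cases s with
          | false =>
            simp only [Bool.not_false, if_pos]
            have e := ih rest hr acc (pvAllFst S && !a) true S
            simp only [bool_aux3] at e
            rw [bool_aux2, e]
          | true =>
            simp only [Bool.not_true, Bool.false_eq_true, if_false]
            exact ih rest hr acc a true S
        · by_cases h3 : (pvHead line).1 == "#endif"
          · simp only [h1, h2, h3, Bool.false_eq_true, if_false, if_pos]
          · by_cases h4 : ((pvHead line).1 == "#set" || (pvHead line).1 == "#unset") = true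
            · simp only [h1, h2, h3, h4, Bool.false_eq_true, if_false, if_pos]
              exact ih rest hr acc a s S
            · simp only [h1, h2, h3, h4, Bool.false_eq_true, if_false, pvAllFst_cons]
              by_cases hap : (a && pvAllFst S) = true
              · rw [if_pos hap, if_pos hap]
                exact ih rest hr (acc ++ [line]) a s S
              · rw [if_neg hap, if_neg hap]
                exact ih rest hr acc a s S

lemma top_sim (settings : PySem.Set String) : ∀ (N : Nat) (lines : List String), lines.length ≤ N →
    ∀ (acc : List String),
    (lines.foldl (pvA2step settings) (acc, [])).1 = pvTop settings lines acc := by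
  intro N
  induction N with
  | zero =>
    intro lines hl acc
    have h0 : lines = [] := List.eq_nil_of_length_eq_zero (Nat.le_zero.mp hl)
    subst h0; simp [pvTop]
  | succ N ih =>
    intro lines hl acc
    rcases lines with _ | ⟨line, rest⟩
    · simp [pvTop]
    · have hr : rest.length ≤ N := by simpa using hl
      rw [List.foldl_cons, pvA2step_eq]
      rw [pvTop]
      by_cases h1 : (pvHead line).1 == "#if"
      · simp only [h1, if_pos]
        have e := block_sim settings N rest hr acc
          (pvAllFst [] && PySem.Set.contains settings (pvHead line).2) false []
        simp only [show pvAllFst [] = true from rfl, Bool.true_and,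
          Bool.and_true] at e ⊢
        rw [e]
        set r := pvBlock settings rest true (PySem.Set.contains settings (pvHead line).2) false acc with hrr
        exact ih r.val.2 (Nat.le_trans r.property hr) r.val.1
      · by_cases h2 : (pvHead line).1 == "#else"
        · simp only [h1, h2, Bool.false_eq_true, if_false, if_pos, Bool.true_or]
          exact ih rest hr acc
        · by_cases h3 : (pvHead line).1 == "#endif"
          · simp only [h1, h2, h3, Bool.false_eq_true, if_false, if_pos, Bool.true_or, Bool.or_true]
            exact ih rest hr acc
          · by_cases h4 : (pvHead line).1 == "#set"
            · simp only [h1, h2, h3, h4, Bool.false_eq_true, if_false, if_pos,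
                Bool.true_or, Bool.or_true]
              exact ih rest hr acc
            · by_cases h5 : (pvHead line).1 == "#unset"
              · simp only [h1, h2, h3, h4, h5, Bool.false_eq_true, if_false, if_pos,
                  Bool.false_or, Bool.or_true]
                exact ih rest hr acc
              · simp only [h1, h2, h3, h4, h5, Bool.false_eq_true, if_false, Bool.or_self,
                  show pvAllFst [] = true from rfl, if_pos]
                exact ih rest hr (acc ++ [line])

lemma pv_settings_eq (fs : PySem.Set String) (as_ : List String) :
    PySem.Set.union (PySem.Set.diff fs PySem.Set.empty) (PySem.Set.ofList as_)
      = PySem.Set.union fs (PySem.Set.ofList as_) := by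
  simp [PySem.Set.diff, PySem.Set.empty]


-- ===== VERDICT (by name: the statement is the Claim_ definition above) =====
theorem preprocess_ini_lines_spec : Claim_equal_preprocess_ini_lines := by
  intro raw_lines active_settings _
  unfold Spec_preprocess_ini_lines
  simp only [preprocess_ini_lines, preprocess_ini_lines_alt]
  rw [pv_settings_eq, collect_sim raw_lines.length raw_lines (Nat.le_refl _) PySem.Set.empty]
  exact top_sim _ raw_lines.length raw_lines (Nat.le_refl _) []
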